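-- pv_equiv track=rewrite | github.com/aloqauchunnurislom-cpu/Fishing-bot | checker/prefilter.py | _check_suspicious_tld
-- ===== SOURCE A (Python) =====
-- def _check_suspicious_tld(domain: str) -> tuple[int, list[str]]:
--     """Xavfli TLD lar (bepul domenlar ko'pincha phishing uchun ishlatiladi)."""
--     suspicious_tlds = {
--         ".tk", ".ml", ".ga", ".cf", ".gq",
--         ".xyz", ".top", ".work", ".click",
--         ".icu", ".buzz", ".monster",
--         ".loan", ".racing", ".win",
--         ".rest", ".fit", ".surf", ".life",
--         ".site", ".online", ".store", ".shop",
--     }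
--     for tld in suspicious_tlds:
--         if domain.endswith(tld):
--             return 15, [f"🌐 Shubhali TLD: {tld}"]
--     return 0, []
-- ===== SOURCE B (Python) =====
-- def _check_suspicious_tld(domain: str) -> tuple[int, list[str]]:
--     """Xavfli TLD lar (bepul domenlar ko'pincha phishing uchun ishlatiladi)."""
--     suspicious_tlds = {
--         ".tk", ".ml", ".ga", ".cf", ".gq",
--         ".xyz", ".top", ".work", ".click",
--         ".icu", ".buzz", ".monster",
--         ".loan", ".racing", ".win",
--         ".rest", ".fit", ".surf", ".life",
--         ".site", ".online", ".store", ".shop",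
--     }
--     idx = domain.rfind(".")
--     tld = domain[idx:] if idx != -1 else ""
--     if tld in suspicious_tlds:
--         return 15, [f"🌐 Shubhali TLD: {tld}"]
--     return 0, []
-- ===== Notes on version B (the rewrite author's own statement) =====
-- stated objective: idiomatic
-- what changed: B extracts the domain's last-dot suffix once (str.rfind + slice) and does a single set membership test, instead of A's loop of endswith over all 22 suspicious TLDs; equivalent because no suspicious TLD contains an inner dot or is a suffix of another.
import Mathlib
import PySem

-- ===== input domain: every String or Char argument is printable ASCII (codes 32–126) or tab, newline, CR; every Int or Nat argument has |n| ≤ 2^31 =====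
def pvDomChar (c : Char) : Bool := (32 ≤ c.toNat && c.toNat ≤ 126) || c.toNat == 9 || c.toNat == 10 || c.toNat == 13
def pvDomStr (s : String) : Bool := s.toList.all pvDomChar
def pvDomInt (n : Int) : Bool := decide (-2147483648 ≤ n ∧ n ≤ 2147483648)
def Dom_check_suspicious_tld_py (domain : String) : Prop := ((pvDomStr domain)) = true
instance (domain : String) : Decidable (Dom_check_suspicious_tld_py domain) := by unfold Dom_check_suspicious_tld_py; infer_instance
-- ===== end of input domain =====

-- B replaces A's loop of endswith over 22 suspicious TLDs by one last-dot suffix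
-- extraction (rfind + slice) and a single membership test (objective: idiomatic).

-- ===== PORT A =====
-- The Python set literal 'suspicious_tlds', as its distinct elements in source order.
-- Python iterates a set in an unspecified order; A's result is order-independent
-- because at most one element can be a suffix of a given domain (no element is a
-- suffix of another — this is exactly what the proof below establishes), so this
-- fixed order is a faithful port on every input.
def pvSuspiciousTlds : List String :=
  [".tk", ".ml", ".ga", ".cf", ".gq",
   ".xyz", ".top", ".work", ".click",
   ".icu", ".buzz", ".monster",
   ".loan", ".racing", ".win",
   ".rest", ".fit", ".surf", ".life",
   ".site", ".online", ".store", ".shop"]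

-- 'for tld in suspicious_tlds: if domain.endswith(tld): return 15, [...]' / 'return 0, []'
def pvTldLoop (domain : String) : List String → Int × List String
  | [] => (0, [])
  | t :: ts =>
      if PySem.Str.endswith domain t then (15, ["🌐 Shubhali TLD: " ++ t])
      else pvTldLoop domain ts

def check_suspicious_tld_py (domain : String) : Int × List String :=
  pvTldLoop domain pvSuspiciousTlds

-- ===== PORT B =====
def check_suspicious_tld_py_alt (domain : String) : Int × List String :=
  let idx := PySem.Str.rfind domain "."
  let tld := if idx ≠ -1 then PySem.Str.slice domain (some idx) none else ""
  if pvSuspiciousTlds.contains tld then (15, ["🌐 Shubhali TLD: " ++ tld])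
  else (0, [])

-- ===== PRECONDITION & SPEC =====
def Spec_check_suspicious_tld_py (domain : String) (out : Int × List String) : Prop := out = check_suspicious_tld_py_alt domain
instance (domain : String) (out : Int × List String) : Decidable (Spec_check_suspicious_tld_py domain out) := by unfold Spec_check_suspicious_tld_py; infer_instance

-- ===== CLAIM (what is proved, stated in full; the proofs are below) =====
def Claim_equal_check_suspicious_tld_py : Prop := ∀ (domain : String), Dom_check_suspicious_tld_py domain → Spec_check_suspicious_tld_py domain (check_suspicious_tld_py domain)

-- ===== LEMMAS AND PROOFS =====

-- the suffix of the domain from its last dot (inclusive); [] when there is no dot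
def pvLastTld (L : List Char) : List Char :=
  if '.' ∈ L then '.' :: (L.reverse.takeWhile (fun c => c != '.')).reverse else []

-- shape of every suspicious TLD: a dot followed by a nonempty dot-free tail
def pvShape (t : List Char) : Bool :=
  t.head? == some '.' && !(t.tail.contains '.')

theorem pvPrefix_singleton (c : Char) (xs : List Char) :
    [c].isPrefixOf xs = true ↔ xs.head? = some c := by
  cases xs with
  | nil => simp [List.isPrefixOf]
  | cons a l =>
      simp [List.isPrefixOf]
      exact eq_comm

theorem pvTakeWhile_app (p : Char → Bool) (l₁ : List Char) (h : ∀ x ∈ l₁, p x = true)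
    (a : Char) (hpa : p a = false) (l₂ : List Char) :
    (l₁ ++ a :: l₂).takeWhile p = l₁ := by
  induction l₁ with
  | nil => rw [List.nil_append, List.takeWhile_cons_of_neg (by simp [hpa])]
  | cons b l ih =>
      have hb : p b = true := h b (by simp)
      rw [List.cons_append, List.takeWhile_cons_of_pos hb,
        ih (fun x hx => h x (by simp [hx]))]

theorem pvDropWhile_head (p : Char → Bool) (l : List Char) (d : Char) (rest : List Char)
    (h : l.dropWhile p = d :: rest) : p d = false := by
  induction l with
  | nil => simp at h
  | cons a l ih =>
      by_cases hpa : p a = true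
      · rw [List.dropWhile_cons_of_pos hpa] at h; exact ih h
      · rw [List.dropWhile_cons_of_neg hpa] at h
        cases h
        simpa using hpa

-- decomposition at the last dot: L = (before).reverse ++ '.' :: (dot-free tail)
theorem pvDecomp (L : List Char) (h : '.' ∈ L) :
    ∃ rest : List Char,
      L = rest.reverse ++ '.' :: (L.reverse.takeWhile (fun c => c != '.')).reverse := by
  set p : Char → Bool := fun c => c != '.' with hp
  have hne : L.reverse.dropWhile p ≠ [] := by
    intro hnil
    have := List.dropWhile_eq_nil_iff.mp hnil '.' (by simpa using h)
    simp [hp] at this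
  obtain ⟨d, rest, hd⟩ : ∃ d rest, L.reverse.dropWhile p = d :: rest := by
    cases hdw : L.reverse.dropWhile p with
    | nil => exact absurd hdw hne
    | cons d rest => exact ⟨d, rest, rfl⟩
  have hdot : d = '.' := by
    have := pvDropWhile_head p L.reverse d rest hd
    simpa [hp] using this
  refine ⟨rest, ?_⟩
  have hsplit : L.reverse.takeWhile p ++ '.' :: rest = L.reverse := by
    rw [← hdot, ← hd]; exact List.takeWhile_append_dropWhile
  have := congrArg List.reverse hsplit
  simpa using this.symm

-- a suspicious-shaped suffix is exactly the last-dot suffix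
theorem pvSuffix_iff (L w : List Char) (hw : '.' ∉ w) :
    ('.' :: w) <:+ L ↔ pvLastTld L = '.' :: w := by
  constructor
  · rintro ⟨pre, hpre⟩
    have hmem : '.' ∈ L := by rw [← hpre]; simp
    have hrev : L.reverse = w.reverse ++ '.' :: pre.reverse := by
      rw [← hpre]; simp
    have htw : L.reverse.takeWhile (fun c => c != '.') = w.reverse := by
      rw [hrev]
      exact pvTakeWhile_app _ w.reverse
        (fun x hx => by
          simp
          intro hxe; exact hw (by simpa [hxe] using List.mem_reverse.mp hx))
        '.' (by simp) pre.reverse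
    simp [pvLastTld, hmem, htw]
  · intro hlt
    have hmem : '.' ∈ L := by
      by_contra hm
      simp [pvLastTld, hm] at hlt
    obtain ⟨rest, hL⟩ := pvDecomp L hmem
    have htw : ('.' :: (L.reverse.takeWhile (fun c => c != '.')).reverse) = '.' :: w := by
      simpa [pvLastTld, hmem] using hlt
    exact ⟨rest.reverse, by rw [hL, htw]⟩

-- A's loop, characterised by the last-dot suffix
theorem pvLoop_eq (domain : String) (ts : List String)
    (h : ∀ t ∈ ts, pvShape t.toList = true) :
    pvTldLoop domain ts =
      if (ts.map String.toList).contains (pvLastTld domain.toList) then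
        (15, ["🌐 Shubhali TLD: " ++ String.ofList (pvLastTld domain.toList)])
      else (0, []) := by
  induction ts with
  | nil => simp [pvTldLoop]
  | cons t ts ih =>
      obtain ⟨w, htw, hwdot⟩ : ∃ w, t.toList = '.' :: w ∧ '.' ∉ w := by
        have := h t (by simp)
        unfold pvShape at this
        cases hts : t.toList with
        | nil => rw [hts] at this; simp at this
        | cons a l =>
            rw [hts] at this
            simp at this
            exact ⟨l, by rw [this.1], by simpa using this.2⟩
      have hiff : (PySem.Str.endswith domain t = true) ↔ pvLastTld domain.toList = t.toList := by
        rw [show PySem.Str.endswith domain t = PySem.Chars.endswith domain.toList t.toList from by simp,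
          PySem.Chars.endswith_iff, htw]
        exact pvSuffix_iff _ w hwdot
      by_cases he : PySem.Str.endswith domain t = true
      · have hlt := hiff.mp he
        have hts : t = String.ofList (pvLastTld domain.toList) := by
          rw [hlt, String.ofList_toList]
        rw [pvTldLoop, if_pos he, List.map_cons,
          if_pos (show ((t.toList :: ts.map String.toList).contains (pvLastTld domain.toList)) = true by simp [hlt]),
          ← hts]
      · have hlt : pvLastTld domain.toList ≠ t.toList := fun hc => he (hiff.mpr hc)
        have he' : PySem.Str.endswith domain t = false := by
          cases hb : PySem.Str.endswith domain t
          · rfl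
          · exact absurd hb he
        have hbe : (pvLastTld domain.toList == t.toList) = false := by
          simpa using hlt
        rw [pvTldLoop, if_neg (by rw [he']; simp), List.map_cons, List.contains_cons,
          hbe, Bool.false_or]
        exact ih (fun u hu => h u (by simp [hu]))

-- rfind.go returns -1 when nothing matches up to n
theorem pvGo_none (s sub : List Char) (n : Nat)
    (h : ∀ j, j ≤ n → sub.isPrefixOf (s.drop j) = false) :
    PySem.Chars.rfind.go s sub n = -1 := by
  induction n with
  | zero =>
      have h0 := h 0 (by omega)
      rw [List.drop_zero] at h0
      rw [PySem.Chars.rfind.go, h0]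
      simp
  | succ n ih =>
      rw [PySem.Chars.rfind.go, h (n+1) (le_refl _)]
      simp
      exact ih (fun j hj => h j (by omega))

-- rfind.go returns the highest matching index
theorem pvGo_hit (s sub : List Char) (n j : Nat) (hj : j ≤ n)
    (hp : sub.isPrefixOf (s.drop j) = true)
    (ha : ∀ i, j < i → i ≤ n → sub.isPrefixOf (s.drop i) = false) :
    PySem.Chars.rfind.go s sub n = (j : Int) := by
  induction n with
  | zero =>
      have hj0 : j = 0 := by omega
      subst hj0
      rw [List.drop_zero] at hp
      rw [PySem.Chars.rfind.go, hp]
      simp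
  | succ n ih =>
      by_cases hje : j = n + 1
      · subst hje
        rw [PySem.Chars.rfind.go, hp]
        simp
      · rw [PySem.Chars.rfind.go, ha (n+1) (by omega) (le_refl _)]
        simp
        exact ih (by omega) (fun i h1 h2 => ha i h1 (by omega))

-- a singleton prefix fails on any dot-free drop
theorem pvNoDotPrefix (xs : List Char) (h : '.' ∉ xs) :
    ['.'].isPrefixOf xs = false := by
  cases hb : ['.'].isPrefixOf xs
  · rfl
  · have := (pvPrefix_singleton '.' xs).mp hb
    exact absurd (List.mem_of_mem_head? (by rw [this]; rfl)) h

-- String-level vs. char-level membership in the TLD table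
theorem pvContains_map (t : String) :
    (pvSuspiciousTlds.map String.toList).contains t.toList = pvSuspiciousTlds.contains t := by
  simp [List.contains_eq_mem, List.mem_map]
  constructor
  · rintro ⟨a, ha, hEq⟩; rwa [String.toList_inj.mp hEq] at ha
  · intro ht; exact ⟨t, ht, rfl⟩

-- B, characterised the same way
theorem pvAlt_eq (domain : String) :
    check_suspicious_tld_py_alt domain =
      if (pvSuspiciousTlds.map String.toList).contains (pvLastTld domain.toList) then
        (15, ["🌐 Shubhali TLD: " ++ String.ofList (pvLastTld domain.toList)])
      else (0, []) := by
  set L := domain.toList with hL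
  by_cases hdot : '.' ∈ L
  · obtain ⟨rest, hdec⟩ := pvDecomp L hdot
    set tw := (L.reverse.takeWhile (fun c => c != '.')).reverse with htw
    set j0 := rest.reverse.length with hj0def
    have hj0 : L.drop j0 = '.' :: tw := by
      rw [hdec, hj0def]; exact List.drop_left
    have hlast : pvLastTld L = '.' :: tw := by
      unfold pvLastTld
      rw [if_pos hdot]
    have hfind : PySem.Str.rfind domain "." = (j0 : Int) := by
      rw [PySem.Str.rfind_eq]
      show PySem.Chars.rfind L ['.'] = _
      rw [PySem.Chars.rfind]
      apply pvGo_hit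
      · show j0 ≤ L.length
        rw [hdec, hj0def]; simp
      · rw [hj0]; exact (pvPrefix_singleton '.' _).mpr rfl
      · intro i h1 _
        rcases Nat.exists_eq_add_of_lt h1 with ⟨m, hm⟩
        have hdropi : L.drop i = tw.drop m := by
          have : L.drop i = (L.drop j0).drop (i - j0) := by
            rw [List.drop_drop]; congr 1; omega
          rw [this, hj0, hm]
          have h2 : j0 + m + 1 - j0 = m + 1 := by omega
          rw [h2, List.drop_succ_cons]
        rw [hdropi]
        apply pvNoDotPrefix
        intro hmem
        have hc : '.' ∈ tw := List.mem_of_mem_drop hmem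
        have := List.mem_takeWhile_imp (List.mem_reverse.mp (htw ▸ hc))
        simp at this
    have hne1 : ((j0 : Int)) ≠ -1 := by omega
    have htld : PySem.Str.slice domain (some ((j0 : Nat) : Int)) none
        = String.ofList (pvLastTld L) := by
      apply String.toList_inj.mp
      rw [PySem.Str.toList_slice, PySem.Chars.slice_eq_listSlice,
        PySem.List.slice_from_natCast, String.toList_ofList, hlast, ← hL, hj0]
    simp only [check_suspicious_tld_py_alt]
    rw [hfind, if_pos hne1, htld, ← pvContains_map, String.toList_ofList]
  · have hfind : PySem.Str.rfind domain "." = -1 := by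
      rw [PySem.Str.rfind_eq]
      show PySem.Chars.rfind L ['.'] = -1
      rw [PySem.Chars.rfind]
      apply pvGo_none
      intro j hj
      apply pvNoDotPrefix
      intro hmem
      exact hdot (List.mem_of_mem_drop hmem)
    have hlast : pvLastTld L = [] := by
      unfold pvLastTld
      rw [if_neg hdot]
    simp only [check_suspicious_tld_py_alt]
    rw [hfind, hlast]
    simp

theorem pvShape_all : ∀ t ∈ pvSuspiciousTlds, pvShape t.toList = true := by decide

-- ===== VERDICT (by name: the statement is the Claim_ definition above) =====
theorem check_suspicious_tld_py_spec : Claim_equal_check_suspicious_tld_py := by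
  intro domain _
  unfold Spec_check_suspicious_tld_py
  rw [check_suspicious_tld_py, pvLoop_eq domain pvSuspiciousTlds pvShape_all, pvAlt_eq]
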